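-- pv_equiv track=rewrite | github.com/acc-cosc-1336-fall-2023/course-BCrenshaw | src/homework/h_strings/strings.py | get_dna_complement
-- ===== SOURCE A (Python) =====
-- acceptable_characters = ['G','A','T','C']
--
-- def get_dna_complement(dna1):
--         dna1 = dna1.upper()
--         stop_length = len(dna1)
--         dc = ''
--         n_complement = 0
--         stop = 0
--         for n in range(stop_length):
--             n_complement = stop_length - n - 1
--             if dna1[n_complement] not in acceptable_characters:
--                 stop = 1
--             elif stop != 1:
--                 if dna1[n_complement] == 'G': dc += 'C'
--                 elif dna1[n_complement] == 'C': dc += 'G'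
--                 elif dna1[n_complement] == 'A': dc += 'T'
--                 elif dna1[n_complement] == 'T': dc += 'A'
--         if stop != 0:
--             return 'Invalid character please only utilize AGCT for the DNA bases.'
--         else: return dc
-- ===== SOURCE B (Python) =====
-- _ERR = 'Invalid character please only utilize AGCT for the DNA bases.'
-- _TABLE = str.maketrans('GATC', 'CTAG')
--
-- def get_dna_complement(dna1):
--     dna1 = dna1.upper()
--     if not all(c in 'GATC' for c in dna1):
--         return _ERR
--     return dna1.translate(_TABLE)[::-1]
-- ===== Notes on version B (the rewrite author's own statement) =====
-- stated objective: idiomatic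
-- what changed: Replaced the single interleaved reverse-index scan with a stop flag by a separate full validation pass followed by a whole-string translation-table transform and slice-reverse (C-level str.translate/[::-1] instead of a per-character Python loop).
import Mathlib
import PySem

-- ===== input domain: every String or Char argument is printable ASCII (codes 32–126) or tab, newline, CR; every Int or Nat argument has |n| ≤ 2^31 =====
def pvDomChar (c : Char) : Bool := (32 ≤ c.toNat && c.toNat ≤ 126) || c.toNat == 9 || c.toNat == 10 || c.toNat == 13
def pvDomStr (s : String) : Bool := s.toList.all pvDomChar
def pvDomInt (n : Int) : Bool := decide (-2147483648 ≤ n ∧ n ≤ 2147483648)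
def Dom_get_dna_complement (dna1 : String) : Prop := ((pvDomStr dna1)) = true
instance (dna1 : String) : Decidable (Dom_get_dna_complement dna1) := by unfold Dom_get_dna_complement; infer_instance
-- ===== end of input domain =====

-- B replaces A's single interleaved reverse-index scan with a stop flag by a
-- separate validation pass followed by a translation-table map and a reverse (idiomatic).

-- ===== PORT A =====
-- A's loop 'for n in range(len(d)): access d[len-n-1]' visits the characters of d
-- in reverse order; it is ported as structural recursion over d.toList.reverse,
-- carrying the same (dc, stop) state.
def pvALoop : List Char → String × Int → String × Int
  | [], st => st
  | c :: rest, (dc, stop) =>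
      pvALoop rest
        (if ¬ (c ∈ ['G','A','T','C']) then (dc, 1)
         else if stop ≠ 1 then
           if c = 'G' then (dc ++ "C", stop)
           else if c = 'C' then (dc ++ "G", stop)
           else if c = 'A' then (dc ++ "T", stop)
           else if c = 'T' then (dc ++ "A", stop)
           else (dc, stop)
         else (dc, stop))

def get_dna_complement (dna1 : String) : String :=
  let d := PySem.Str.upper dna1
  let res := pvALoop d.toList.reverse ("", 0)
  if res.2 ≠ 0 then "Invalid character please only utilize AGCT for the DNA bases."
  else res.1

-- ===== PORT B =====
-- translation table GATC -> CTAG (str.maketrans/translate; identity elsewhere,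
-- which the validation pass makes unreachable)
def pvComp (c : Char) : Char :=
  if c = 'G' then 'C' else if c = 'A' then 'T' else if c = 'T' then 'A'
  else if c = 'C' then 'G' else c

def get_dna_complement_alt (dna1 : String) : String :=
  let d := (PySem.Str.upper dna1).toList
  if ¬ (d.all (fun c => c ∈ ['G','A','T','C'])) then
    "Invalid character please only utilize AGCT for the DNA bases."
  else String.ofList ((d.map pvComp).reverse)

-- ===== PRECONDITION & SPEC =====
def Spec_get_dna_complement (dna1 : String) (out : String) : Prop := out = get_dna_complement_alt dna1
instance (dna1 : String) (out : String) : Decidable (Spec_get_dna_complement dna1 out) := by unfold Spec_get_dna_complement; infer_instance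

-- ===== CLAIM (what is proved, stated in full; the proofs are below) =====
def Claim_equal_get_dna_complement : Prop := ∀ (dna1 : String), Dom_get_dna_complement dna1 → Spec_get_dna_complement dna1 (get_dna_complement dna1)

-- ===== LEMMAS AND PROOFS =====

lemma pvALoop_stop (l : List Char) (dc : String) (s : Int) :
    (pvALoop l (dc, s)).2 = if l.all (fun c => c ∈ ['G','A','T','C']) then s else 1 := by
  induction l generalizing dc s with
  | nil => simp [pvALoop]
  | cons c rest ih =>
    simp only [pvALoop, List.all_cons]
    by_cases hc : c ∈ ['G','A','T','C'] <;> simp [hc, ih] <;> split_ifs <;> simp_all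

lemma pvALoop_valid (l : List Char) (dc : String)
    (h : l.all (fun c => c ∈ ['G','A','T','C']) = true) :
    pvALoop l (dc, 0) = (dc ++ String.ofList (l.map pvComp), 0) := by
  induction l generalizing dc with
  | nil =>
    simp only [pvALoop, List.map_nil, Prod.mk.injEq, and_true]
    exact String.toList_injective (by simp)
  | cons c rest ih =>
    simp only [List.all_cons, Bool.and_eq_true] at h
    obtain ⟨hc, hrest⟩ := h
    simp only [decide_eq_true_eq, List.mem_cons, List.not_mem_nil, or_false] at hc
    rcases hc with rfl | rfl | rfl | rfl <;>
    · simp only [pvALoop, pvComp, List.map_cons]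
      simp only [Char.reduceEq, reduceIte]
      rw [if_neg (by decide), if_pos (by decide), ih _ hrest]
      refine Prod.ext ?_ rfl
      exact String.toList_injective (by simp)

lemma pvMain_list (d : List Char) :
    (if (pvALoop d.reverse ("", 0)).2 ≠ 0 then
        "Invalid character please only utilize AGCT for the DNA bases."
      else (pvALoop d.reverse ("", 0)).1)
    = (if ¬ (d.all (fun c => c ∈ ['G','A','T','C'])) then
        "Invalid character please only utilize AGCT for the DNA bases."
      else String.ofList ((d.map pvComp).reverse)) := by
  by_cases h : d.all (fun c => c ∈ ['G','A','T','C']) = true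
  · have hrev : d.reverse.all (fun c => c ∈ ['G','A','T','C']) = true := by simpa using h
    rw [pvALoop_valid _ _ hrev]
    simp only [h, ne_eq, not_true_eq_false, if_false]
    simp only [List.map_reverse]
    exact String.toList_injective (by simp)
  · have hrev : d.reverse.all (fun c => c ∈ ['G','A','T','C']) = false := by
      simp only [List.all_reverse]; exact Bool.eq_false_iff.mpr h
    have hs := pvALoop_stop d.reverse "" 0
    rw [hrev] at hs
    simp at hs
    simp only [hs, ne_eq, one_ne_zero, not_false_eq_true, if_true]
    rw [if_pos (by simpa using h)]

-- ===== VERDICT (by name: the statement is the Claim_ definition above) =====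
theorem get_dna_complement_spec : Claim_equal_get_dna_complement := by
  intro dna1 _
  unfold Spec_get_dna_complement get_dna_complement get_dna_complement_alt
  exact pvMain_list (PySem.Str.upper dna1).toList
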